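-- pv_equiv track=rewrite | github.com/towre676-cloud/tau_crystal | scripts/freed/tmf_qleg_emit.py | e4_coeffs
-- ===== SOURCE A (Python) =====
-- def e4_coeffs(N=48):
--     a = [0] * (N + 1)
--     a[0] = 1
--     for n in range(1, N + 1):
--         s = 0
--         for d in range(1, n + 1):
--             if n % d == 0:
--                 s += d ** 3
--         a[n] = 240 * s
--     return a
-- ===== SOURCE B (Python) =====
-- def _sigma3(n):
--     s = 0
--     d = 1
--     while d * d <= n:
--         if n % d == 0:
--             s += d ** 3
--             q = n // d
--             if q != d:
--                 s += q ** 3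
--         d += 1
--     return s
--
-- def e4_coeffs(N=48):
--     return [1] + [240 * _sigma3(n) for n in range(1, N + 1)]
-- ===== Notes on version B (the rewrite author's own statement) =====
-- stated objective: faster
-- what changed: Replaced A's in-place array with per-index scan over all candidate divisors by a list comprehension whose helper enumerates only divisors up to sqrt(n), adding each divisor's cube together with its cofactor's cube.
import Mathlib
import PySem

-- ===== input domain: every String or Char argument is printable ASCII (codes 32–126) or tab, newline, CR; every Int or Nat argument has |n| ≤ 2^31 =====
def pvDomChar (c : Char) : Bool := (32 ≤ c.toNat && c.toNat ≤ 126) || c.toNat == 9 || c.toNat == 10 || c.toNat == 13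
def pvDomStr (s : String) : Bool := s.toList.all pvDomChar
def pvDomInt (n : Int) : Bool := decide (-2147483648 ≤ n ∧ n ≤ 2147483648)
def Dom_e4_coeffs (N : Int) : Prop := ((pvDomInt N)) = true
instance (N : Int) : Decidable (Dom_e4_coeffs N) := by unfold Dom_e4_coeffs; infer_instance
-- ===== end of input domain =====

-- B builds the list by a comprehension whose helper sums d^3 + (n//d)^3 over divisors d ≤ sqrt(n)
-- only, instead of A's in-place array filled by a scan over every candidate divisor (objective: faster, measured).

-- ===== PORT A =====
def e4_coeffs (N : Int) : List Int :=
  let a := PySem.List.pySetD (List.replicate (N + 1).toNat 0) 0 1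
  (PySem.List.pyRange 1 (N + 1) 1).foldl (fun a n =>
    let s := (PySem.List.pyRange 1 (n + 1) 1).foldl
      (fun s d => if PySem.Int.mod n d = 0 then s + d ^ 3 else s) 0
    PySem.List.pySetD a n (240 * s)) a

-- ===== PORT B =====
-- helper _sigma3's while loop: fuel-bounded recursion over d with accumulator s
def pvSigma3Loop (n : Int) : Int → Int → Nat → Int
  | _, s, 0 => s
  | d, s, fuel + 1 =>
    if d * d ≤ n then
      let s' :=
        if PySem.Int.mod n d = 0 then
          let q := PySem.Int.floordiv n d
          (s + d ^ 3) + (if q ≠ d then q ^ 3 else 0)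
        else s
      pvSigma3Loop n (d + 1) s' fuel
    else s

def pvSigma3 (n : Int) : Int := pvSigma3Loop n 1 0 (n.toNat + 1)

def e4_coeffs_alt (N : Int) : List Int :=
  [1] ++ (PySem.List.pyRange 1 (N + 1) 1).map (fun n => 240 * pvSigma3 n)

-- ===== PRECONDITION & SPEC =====
-- For negative N the initial list of A is empty and its first write raises IndexError.
def Pre_e4_coeffs (N : Int) : Prop := 0 ≤ N
instance (N : Int) : Decidable (Pre_e4_coeffs N) := by unfold Pre_e4_coeffs; infer_instance
def pvWitness_e4_coeffs : Int := (6)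

def Spec_e4_coeffs (N : Int) (out : List Int) : Prop := out = e4_coeffs_alt N
instance (N : Int) (out : List Int) : Decidable (Spec_e4_coeffs N out) := by unfold Spec_e4_coeffs; infer_instance

-- ===== CLAIM (what is proved, stated in full; the proofs are below) =====
def Claim_equal_e4_coeffs : Prop := ∀ (N : Int), Dom_e4_coeffs N → Pre_e4_coeffs N → Spec_e4_coeffs N (e4_coeffs N)
-- ===== LEMMAS AND PROOFS =====

-- any fold that only writes cells with pySetD keeps the length
theorem pvLenFoldSet (g : List Int → Int → Int) :
    ∀ (ns : List Int) (a : List Int),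
      (ns.foldl (fun a n => PySem.List.pySetD a n (g a n)) a).length = a.length := by
  intro ns
  induction ns with
  | nil => intro a; rfl
  | cons n ns ih =>
    intro a
    simp [List.foldl_cons, ih, PySem.List.length_pySetD]

-- A's loop: each iteration writes cell n with a value v n depending only on n
theorem pvSetFold (v : Int → Int) :
    ∀ (ns : List Int) (a : List Int) (i : Nat), (∀ n ∈ ns, 0 ≤ n) →
      (ns.foldl (fun a n => PySem.List.pySetD a n (v n)) a).getD i 0 =
        if ((i : Int) ∈ ns ∧ i < a.length) then v i else a.getD i 0 := by
  intro ns
  induction ns with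
  | nil => intro a i _; simp
  | cons n ns ih =>
    intro a i hnn
    have hn : 0 ≤ n := hnn n (by simp)
    have hstep : (List.foldl (fun a n => PySem.List.pySetD a n (v n)) a (n :: ns)) =
        List.foldl (fun a n => PySem.List.pySetD a n (v n)) (PySem.List.pySetD a n (v n)) ns := rfl
    rw [hstep, ih _ _ (fun m hm => hnn m (by simp [hm]))]
    rw [PySem.List.pySetD_of_nonneg a (v n) hn]
    have hlen : (a.set n.toNat (v n)).length = a.length := by simp
    rw [hlen]
    by_cases hc : ((i : Int) ∈ ns ∧ i < a.length)
    · rw [if_pos hc, if_pos ⟨List.mem_cons_of_mem n hc.1, hc.2⟩]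
    · rw [if_neg hc]
      have hset : (a.set n.toNat (v n)).getD i 0 =
          if (n.toNat = i ∧ i < a.length) then v n else a.getD i 0 := by
        simp only [List.getD_eq_getElem?_getD, List.getElem?_set]
        by_cases h1 : n.toNat = i
        · by_cases h2 : i < a.length
          · simp [h1, h2]
          · simp [h1, h2]
        · simp [h1]
      rw [hset]
      by_cases hn2 : (n.toNat = i ∧ i < a.length)
      · have hin : (i : Int) = n := by omega
        rw [if_pos hn2, if_pos ⟨by rw [hin]; exact List.mem_cons_self, hn2.2⟩]
        exact congrArg v hin.symm
      · rw [if_neg hn2]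
        have hnc : ¬ (((i : Int) ∈ n :: ns) ∧ i < a.length) := by
          rintro ⟨hmem, hl⟩
          rcases List.mem_cons.mp hmem with h | h
          · exact hn2 ⟨by omega, hl⟩
          · exact hc ⟨h, hl⟩
        rw [if_neg hnc]

-- A's inner loop is a sum over the full range with an if-term
theorem pvInnerA (n : Int) :
    (PySem.List.pyRange 1 (n + 1) 1).foldl
        (fun s d => if PySem.Int.mod n d = 0 then s + d ^ 3 else s) 0 =
      ((PySem.List.pyRange 1 (n + 1) 1).map
        (fun d => if PySem.Int.mod n d = 0 then d ^ 3 else 0)).sum := by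
  rw [PySem.List.foldl_congr_mem (PySem.List.pyRange 1 (n + 1) 1) _
    (fun s d => s + if PySem.Int.mod n d = 0 then d ^ 3 else 0) 0
    (by intro acc x _; by_cases h : PySem.Int.mod n x = 0 <;> simp [h])]
  rw [PySem.List.foldl_add, zero_add]

-- the initial list [1, 0, 0, …] pointwise
theorem pvInit (N : Int) (i : Nat) (hN : 0 ≤ N) :
    (PySem.List.pySetD (List.replicate (N + 1).toNat 0) (0 : Int) (1 : Int)).getD i 0 =
      if i = 0 then (1 : Int) else 0 := by
  rw [PySem.List.pySetD_of_nonneg _ _ (by omega)]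
  simp only [Int.toNat_zero]
  rw [List.getD_eq_getElem?_getD, List.getElem?_set]
  by_cases hi : i = 0
  · subst hi
    rw [if_pos rfl, if_pos (show (0 : Nat) < (List.replicate (N + 1).toNat (0 : Int)).length by
      simp; omega)]
    simp
  · rw [if_neg (by omega : ¬ (0 : Nat) = i), if_neg hi, List.getElem?_replicate]
    split <;> rfl

-- list sum over Finset.range
theorem pvSumMapRange (g : Nat → Int) : ∀ (n : Nat),
    ((List.range n).map g).sum = ∑ k ∈ Finset.range n, g k := by
  intro n
  induction n with
  | zero => simp
  | succ n ih => rw [List.range_succ, Finset.sum_range_succ, List.map_append, List.sum_append, ih]; simp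

-- A's inner sum is the sum of cubes over the divisors of m
theorem pvDivisorsSum (m : Nat) (f : Nat → Int) :
    ∑ d ∈ m.divisors, f d = ∑ d ∈ Finset.Ico 1 (m + 1), (if d ∣ m then f d else 0) := by
  unfold Nat.divisors
  rw [Finset.sum_filter]

-- A's inner sum is the sum of cubes over the divisors of m
theorem pvListSumDiv (m : Nat) (hm : 1 ≤ m) :
    ((PySem.List.pyRange 1 ((m : Int) + 1) 1).map
        (fun d => if PySem.Int.mod (m : Int) d = 0 then d ^ 3 else 0)).sum =
      ∑ d ∈ m.divisors, (d : Int) ^ 3 := by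
  rw [PySem.List.pyRange_of_pos 1 ((m : Int) + 1) (by omega : (0:Int) < 1)]
  have hcount : (if (1 : Int) < (m : Int) + 1 then ((((m : Int) + 1) - 1 + 1 - 1) / 1).toNat else 0) = m := by
    rw [if_pos (by omega)]; simp
  rw [hcount, List.map_map, pvSumMapRange]
  have hterm : ∀ k ∈ Finset.range m,
      ((fun d => if PySem.Int.mod (m : Int) d = 0 then d ^ 3 else 0) ∘ fun k : Nat => (1 : Int) + 1 * (k : Int)) k =
        (if (1 + k) ∣ m then (((1 + k : Nat)) : Int) ^ 3 else 0) := by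
    intro k _
    have hc : (1 : Int) + 1 * (k : Int) = ((1 + k : Nat) : Int) := by push_cast; ring
    simp only [Function.comp, hc, PySem.Int.mod_eq_zero_iff_dvd, Int.natCast_dvd_natCast]
  rw [Finset.sum_congr rfl hterm, pvDivisorsSum m (fun d => (d : Int) ^ 3),
    Finset.sum_Ico_eq_sum_range]
  simp only [Nat.add_sub_cancel]

-- splitting the divisor-cube sum at sqrt m: each small divisor d contributes d^3 and (unless d*d = m) also (m/d)^3
theorem pvSplit (m : Nat) (hm : 1 ≤ m) :
    ∑ d ∈ m.divisors, (d : Int) ^ 3 =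
      ∑ d ∈ m.divisors.filter (fun d => d * d ≤ m),
        ((d : Int) ^ 3 + if d * d ≠ m then ((m / d : Nat) : Int) ^ 3 else 0) := by
  have hm0 : m ≠ 0 := by omega
  rw [Finset.sum_add_distrib]
  rw [← Finset.sum_filter_add_sum_filter_not m.divisors (fun d => d * d ≤ m) (fun d => (d : Int) ^ 3)]
  congr 1
  have h1 : ∑ d ∈ m.divisors.filter (fun d => d * d ≤ m),
      (if d * d ≠ m then ((m / d : Nat) : Int) ^ 3 else 0) =
      ∑ d ∈ (m.divisors.filter (fun d => d * d ≤ m)).filter (fun d => d * d ≠ m),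
        ((m / d : Nat) : Int) ^ 3 := (Finset.sum_filter _ _).symm
  rw [h1, Finset.filter_filter]
  have h2 : m.divisors.filter (fun d => d * d ≤ m ∧ d * d ≠ m) =
      m.divisors.filter (fun d => d * d < m) := by
    apply Finset.filter_congr; intro d _; constructor
    · intro h; omega
    · intro h; omega
  rw [h2]
  apply Finset.sum_nbij' (i := fun d => m / d) (j := fun e => m / e)
  · intro d hd
    rw [Finset.mem_filter, Nat.mem_divisors] at hd ⊢
    obtain ⟨⟨hdvd, _⟩, hlt⟩ := hd
    obtain ⟨e, he⟩ := hdvd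
    have hd0 : 0 < d := by
      rcases Nat.eq_zero_or_pos d with h | h
      · subst h; simp at he; omega
      · exact h
    have hdiv : m / d = e := by rw [he]; exact Nat.mul_div_cancel_left e hd0
    have he0 : 0 < e := by
      rcases Nat.eq_zero_or_pos e with h | h
      · subst h; simp at he; omega
      · exact h
    have hed : e < d := by
      by_contra hc
      have : d * d ≤ d * e := Nat.mul_le_mul_left d (by omega)
      omega
    refine ⟨⟨⟨d, by rw [hdiv, he]; ring⟩, hm0⟩, ?_⟩
    rw [hdiv]
    calc e * e < e * d := mul_lt_mul_of_pos_left hed he0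
    _ = m := by rw [he]; ring
  · intro e he
    rw [Finset.mem_filter, Nat.mem_divisors] at he ⊢
    obtain ⟨⟨hdvd, _⟩, hlt⟩ := he
    obtain ⟨d, hd⟩ := hdvd
    have he0 : 0 < e := by
      rcases Nat.eq_zero_or_pos e with h | h
      · subst h; simp at hd; omega
      · exact h
    have hdiv : m / e = d := by rw [hd]; exact Nat.mul_div_cancel_left d he0
    have hd0 : 0 < d := by
      rcases Nat.eq_zero_or_pos d with h | h
      · subst h; simp at hd; omega
      · exact h
    have hed : e < d := by
      by_contra hc
      have : e * d ≤ e * e := Nat.mul_le_mul_left e (by omega)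
      omega
    refine ⟨⟨⟨e, by rw [hdiv, hd]; ring⟩, hm0⟩, ?_⟩
    rw [hdiv]
    have hlt2 : m < d * d := by
      calc m = e * d := hd
      _ < d * d := mul_lt_mul_of_pos_right hed hd0
    omega
  · intro d hd
    rw [Finset.mem_filter, Nat.mem_divisors] at hd
    exact Nat.div_div_self hd.1.1 hm0
  · intro e he
    rw [Finset.mem_filter, Nat.mem_divisors] at he
    exact Nat.div_div_self he.1.1 hm0
  · intro d hd
    rw [Finset.mem_filter, Nat.mem_divisors] at hd
    rw [Nat.div_div_self hd.1.1 hm0]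

-- the while loop of _sigma3, characterised: starting at d it adds the split-sum terms of all divisors ≥ d below sqrt m
theorem pvLoopSum (m : Nat) (hm : 1 ≤ m) :
    ∀ (fuel : Nat) (d : Nat) (s : Int), 1 ≤ d → m < d + fuel →
      pvSigma3Loop (m : Int) (d : Int) s fuel =
        s + ∑ e ∈ m.divisors.filter (fun e => d ≤ e ∧ e * e ≤ m),
              ((e : Int) ^ 3 + if e * e ≠ m then ((m / e : Nat) : Int) ^ 3 else 0) := by
  have hm0 : m ≠ 0 := by omega
  intro fuel
  induction fuel with
  | zero =>
    intro d s hd hfuel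
    have hempty : m.divisors.filter (fun e => d ≤ e ∧ e * e ≤ m) = ∅ := by
      apply Finset.filter_eq_empty_iff.mpr
      intro e he
      have hle : e ≤ m := Nat.le_of_dvd (by omega) (Nat.mem_divisors.mp he).1
      intro hc
      omega
    rw [hempty, Finset.sum_empty, add_zero]
    rfl
  | succ fuel ih =>
    intro d s hd hfuel
    have hstep : pvSigma3Loop (m : Int) (d : Int) s (fuel + 1) =
        if (d : Int) * (d : Int) ≤ (m : Int) then
          pvSigma3Loop (m : Int) ((d : Int) + 1)
            (if PySem.Int.mod (m : Int) (d : Int) = 0 then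
              (s + (d : Int) ^ 3) +
                (if PySem.Int.floordiv (m : Int) (d : Int) ≠ (d : Int) then
                  (PySem.Int.floordiv (m : Int) (d : Int)) ^ 3 else 0)
            else s) fuel
        else s := rfl
    rw [hstep]
    have harith : (d : Int) + 1 = ((d + 1 : Nat) : Int) := by push_cast; ring
    by_cases hdd : d * d ≤ m
    · rw [if_pos (by exact_mod_cast hdd), harith, ih (d + 1) _ (by omega) (by omega)]
      by_cases hdvd : d ∣ m
      · have hmod : PySem.Int.mod (m : Int) (d : Int) = 0 :=
          (PySem.Int.mod_eq_zero_iff_dvd _ _).mpr (Int.natCast_dvd_natCast.mpr hdvd)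
        have hq : PySem.Int.floordiv (m : Int) (d : Int) = ((m / d : Nat) : Int) :=
          PySem.Int.floordiv_natCast m d
        have hqd : (((m / d : Nat) : Int) ≠ (d : Int)) ↔ d * d ≠ m := by
          rw [Ne, Int.natCast_inj]
          constructor
          · intro h hc
            apply h
            rw [← hc, Nat.mul_div_cancel_left d (by omega : 0 < d)]
          · intro h hc
            apply h
            obtain ⟨e, he⟩ := hdvd
            have he2 : m / d = e := by rw [he]; exact Nat.mul_div_cancel_left e (by omega)
            rw [he, ← hc, he2]
        have hdmem : d ∈ m.divisors.filter (fun e => d ≤ e ∧ e * e ≤ m) := by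
          rw [Finset.mem_filter, Nat.mem_divisors]
          exact ⟨⟨hdvd, hm0⟩, le_refl d, hdd⟩
        have hins : m.divisors.filter (fun e => d ≤ e ∧ e * e ≤ m) =
            insert d (m.divisors.filter (fun e => d + 1 ≤ e ∧ e * e ≤ m)) := by
          apply Finset.ext
          intro e
          simp only [Finset.mem_insert, Finset.mem_filter]
          constructor
          · rintro ⟨hmem, hle, hsq⟩
            rcases Nat.eq_or_lt_of_le hle with h | h
            · exact Or.inl h.symm
            · exact Or.inr ⟨hmem, by omega, hsq⟩
          · rintro (h | ⟨hmem, hle, hsq⟩)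
            · subst h; exact (Finset.mem_filter.mp hdmem)
            · exact ⟨hmem, by omega, hsq⟩
        have hnotmem : d ∉ m.divisors.filter (fun e => d + 1 ≤ e ∧ e * e ≤ m) := by
          rw [Finset.mem_filter]
          rintro ⟨_, hle, _⟩
          omega
        rw [if_pos hmod, hq, if_congr hqd rfl rfl, hins, Finset.sum_insert hnotmem]
        by_cases hne : d * d ≠ m
        · rw [if_pos hne]; ring
        · rw [if_neg hne]; ring
      · have hmod : PySem.Int.mod (m : Int) (d : Int) ≠ 0 := by
          simp only [Ne, PySem.Int.mod_eq_zero_iff_dvd, Int.natCast_dvd_natCast]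
          exact hdvd
        have hfil : m.divisors.filter (fun e => d ≤ e ∧ e * e ≤ m) =
            m.divisors.filter (fun e => d + 1 ≤ e ∧ e * e ≤ m) := by
          apply Finset.filter_congr
          intro e he
          have hed : e ≠ d := by
            intro hc; subst hc; exact hdvd (Nat.mem_divisors.mp he).1
          constructor
          · rintro ⟨hle, hsq⟩; exact ⟨by omega, hsq⟩
          · rintro ⟨hle, hsq⟩; exact ⟨by omega, hsq⟩
        rw [if_neg hmod, hfil]
    · rw [if_neg (by exact_mod_cast hdd)]
      have hempty : m.divisors.filter (fun e => d ≤ e ∧ e * e ≤ m) = ∅ := by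
        apply Finset.filter_eq_empty_iff.mpr
        intro e _
        rintro ⟨hle, hsq⟩
        have : d * d ≤ e * e := Nat.mul_le_mul hle hle
        omega
      rw [hempty, Finset.sum_empty, add_zero]

-- _sigma3 computes the divisor-cube sum
theorem pvSigma3Eq (m : Nat) (hm : 1 ≤ m) :
    pvSigma3 (m : Int) = ∑ d ∈ m.divisors, (d : Int) ^ 3 := by
  unfold pvSigma3
  have ht : ((m : Int)).toNat = m := by simp
  rw [ht]
  rw [show (1 : Int) = ((1 : Nat) : Int) by norm_num,
    pvLoopSum m hm (m + 1) 1 0 (le_refl 1) (by omega), zero_add]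
  have hfil : m.divisors.filter (fun e => 1 ≤ e ∧ e * e ≤ m) =
      m.divisors.filter (fun e => e * e ≤ m) := by
    apply Finset.filter_congr
    intro e he
    have := Nat.pos_of_mem_divisors he
    constructor
    · rintro ⟨_, h⟩; exact h
    · intro h; exact ⟨by omega, h⟩
  rw [hfil, ← pvSplit m hm]

-- length of B's comprehension range
theorem pvRangeLen (N : Int) (hN : 0 ≤ N) :
    (PySem.List.pyRange 1 (N + 1) 1).length = N.toNat := by
  rw [PySem.List.pyRange_of_pos 1 (N + 1) (by omega : (0:Int) < 1), List.length_map, List.length_range]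
  by_cases h : (1 : Int) < N + 1
  · rw [if_pos h]; simp
  · rw [if_neg h]; omega

-- ===== VERDICT (by name: the statement is the Claim_ definition above) =====
theorem e4_coeffs_spec : Claim_equal_e4_coeffs := by
  intro N _ hPre
  have hN : 0 ≤ N := hPre
  unfold Spec_e4_coeffs
  have eA : e4_coeffs N = (PySem.List.pyRange 1 (N + 1) 1).foldl (fun a n =>
      PySem.List.pySetD a n (240 * (PySem.List.pyRange 1 (n + 1) 1).foldl
        (fun s d => if PySem.Int.mod n d = 0 then s + d ^ 3 else s) 0))
      (PySem.List.pySetD (List.replicate (N + 1).toNat 0) 0 1) := rfl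
  rw [eA]
  set init := PySem.List.pySetD (List.replicate (N + 1).toNat 0) (0 : Int) (1 : Int) with hinit
  have hlinit : init.length = (N + 1).toNat := by
    rw [hinit, PySem.List.length_pySetD]; simp
  have hlenA : ((PySem.List.pyRange 1 (N + 1) 1).foldl (fun a n =>
      PySem.List.pySetD a n (240 * (PySem.List.pyRange 1 (n + 1) 1).foldl
        (fun s d => if PySem.Int.mod n d = 0 then s + d ^ 3 else s) 0)) init).length = init.length :=
    pvLenFoldSet _ _ init
  have hlenB : (e4_coeffs_alt N).length = (N + 1).toNat := by
    show ((1 : Int) :: (PySem.List.pyRange 1 (N + 1) 1).map (fun n => 240 * pvSigma3 n)).length = _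
    rw [List.length_cons, List.length_map, pvRangeLen N hN]
    omega
  apply List.ext_getElem (by rw [hlenA, hlinit, hlenB])
  intro i hiA hiB
  rw [← List.getD_eq_getElem _ 0 hiA, ← List.getD_eq_getElem _ 0 hiB]
  have hi : i < (N + 1).toNat := by rw [hlinit] at hlenA; omega
  rw [pvSetFold _ _ init i (by intro n hn; exact le_trans (by omega) (PySem.List.mem_pyRange_one.mp hn).1)]
  show _ = ((1 : Int) :: (PySem.List.pyRange 1 (N + 1) 1).map (fun n => 240 * pvSigma3 n)).getD i 0
  match i, hi with
  | 0, _ =>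
    have hnm : ((0 : Nat) : Int) ∉ PySem.List.pyRange 1 (N + 1) 1 := by
      intro h; have := (PySem.List.mem_pyRange_one.mp h).1; norm_num at this
    rw [if_neg (by rintro ⟨h, _⟩; exact hnm h), pvInit N 0 hN]
    rfl
  | j + 1, hi =>
    have h1 : (1 : Int) ≤ ((j + 1 : Nat) : Int) := by push_cast; omega
    have h2 : ((j + 1 : Nat) : Int) < N + 1 := by push_cast; omega
    have hmem : (((j + 1 : Nat) : Int)) ∈ PySem.List.pyRange 1 (N + 1) 1 :=
      PySem.List.mem_pyRange_one.mpr ⟨h1, h2⟩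
    rw [if_pos ⟨hmem, by omega⟩]
    have hrw : PySem.List.pyRange 1 (N + 1) 1 =
        (List.range N.toNat).map (fun k : Nat => (1 : Int) + 1 * (k : Int)) := by
      rw [PySem.List.pyRange_of_pos 1 (N + 1) (by omega : (0:Int) < 1)]
      congr 1
      by_cases h : (1 : Int) < N + 1
      · rw [if_pos h]; simp
      · rw [if_neg h]; omega
    have hcons : ((1 : Int) :: (PySem.List.pyRange 1 (N + 1) 1).map (fun n => 240 * pvSigma3 n)).getD (j + 1) 0 =
        ((PySem.List.pyRange 1 (N + 1) 1).map (fun n => 240 * pvSigma3 n)).getD j 0 := by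
      simp [List.getD_eq_getElem?_getD]
    have hBget : ((PySem.List.pyRange 1 (N + 1) 1).map (fun n => 240 * pvSigma3 n)).getD j 0 =
        240 * pvSigma3 ((j + 1 : Nat) : Int) := by
      rw [hrw, List.map_map]
      have hjlen : j < ((List.range N.toNat).map
          ((fun n => 240 * pvSigma3 n) ∘ fun k : Nat => (1 : Int) + 1 * (k : Int))).length := by
        rw [List.length_map, List.length_range]; omega
      rw [List.getD_eq_getElem _ 0 hjlen, List.getElem_map, List.getElem_range]
      show 240 * pvSigma3 ((1 : Int) + 1 * (j : Int)) = _
      congr 1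
      push_cast
      ring
    rw [hcons, hBget, pvInnerA, pvSigma3Eq (j + 1) (by omega)]
    rw [pvListSumDiv (j + 1) (by omega)]
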